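-- pv_equiv track=rewrite | github.com/acarrasco/programa_conmigo | ep028/aoc_2017_14.py | part_2
-- ===== SOURCE A (Python) =====
-- ADJACENCY = [(1, 0), (-1, 0), (0, -1), (0, 1)]
--
-- def flood_fill(grid, i, j, visited):
--     for di, dj in ADJACENCY:
--         ni, nj = i + di, j + dj
--         if (
--                 0 <= ni < len(grid)
--             and 0 <= nj < len(grid)
--             and grid[ni][nj] == '1'
--             and (ni, nj) not in visited
--         ):
--             visited.add((ni, nj))
--             flood_fill(grid, ni, nj, visited)
--
-- def part_2(grid):
--     string_grid = [
--         ''.join(f'{i:08b}' for i in row) for row in grid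
--     ]
--     region_count = 0
--     visited = set()
--     for i, row in enumerate(string_grid):
--         for j, c in enumerate(row):
--             if c == '1' and (i, j) not in visited:
--                 flood_fill(string_grid, i, j, visited)
--                 region_count += 1
--     return region_count
-- ===== SOURCE B (Python) =====
-- ADJACENCY = [(1, 0), (-1, 0), (0, -1), (0, 1)]
--
-- def part_2(grid):
--     string_grid = [
--         ''.join(f'{i:08b}' for i in row) for row in grid
--     ]
--     n = len(string_grid)
--     region_count = 0
--     visited = set()
--     for i, row in enumerate(string_grid):
--         for j, c in enumerate(row):
--             if c == '1' and (i, j) not in visited: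
--                 region_count += 1
--                 # iterative flood fill: explicit stack of (cell, remaining directions)
--                 stack = [((i, j), ADJACENCY)]
--                 while stack:
--                     (ci, cj), ds = stack.pop()
--                     if ds:
--                         (di, dj), rest = ds[0], ds[1:]
--                         stack.append(((ci, cj), rest))
--                         ni, nj = ci + di, cj + dj
--                         if 0 <= ni < n and 0 <= nj < n and string_grid[ni][nj] == '1' and (ni, nj) not in visited:
--                             visited.add((ni, nj))
--                             stack.append(((ni, nj), ADJACENCY))
--     return region_count
-- ===== Notes on version B (the rewrite author's own statement) =====
-- stated objective: alternative
-- what changed: The recursive flood_fill is replaced by an iterative flood fill driven by an explicit stack of (cell, remaining-directions) frames, keeping the same shared visited set and scan order.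
import Mathlib
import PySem

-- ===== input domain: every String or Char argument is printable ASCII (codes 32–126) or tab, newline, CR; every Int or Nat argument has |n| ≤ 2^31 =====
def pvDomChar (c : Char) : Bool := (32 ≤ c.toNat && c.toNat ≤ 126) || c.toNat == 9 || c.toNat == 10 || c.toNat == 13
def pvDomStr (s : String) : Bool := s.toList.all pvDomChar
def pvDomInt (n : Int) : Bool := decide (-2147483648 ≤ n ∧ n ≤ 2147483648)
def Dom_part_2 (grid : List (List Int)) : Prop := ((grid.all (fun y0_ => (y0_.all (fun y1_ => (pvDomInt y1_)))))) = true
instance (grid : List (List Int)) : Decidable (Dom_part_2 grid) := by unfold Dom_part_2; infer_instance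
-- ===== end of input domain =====

-- B replaces the recursive flood_fill with an iterative one driven by an explicit stack of
-- (cell, remaining-directions) frames over the same shared visited set; same cost, different decomposition.

-- ===== PORT A =====
-- shared helpers (identical Python text in Source A and Source B): ADJACENCY and the binary string grid
def pvADJ : List (Int × Int) := [(1, 0), (-1, 0), (0, -1), (0, 1)]

-- f'{n:08b}' for a natural number: binary digits, no padding (core's base-2 digit printer)
def pvNatBin (n : Nat) : List Char := Nat.toDigits 2 n

def pvPad0 (w : Nat) (s : List Char) : List Char := List.replicate (w - s.length) '0' ++ s

-- exact port of Python f'{i:08b}' (sign, then zero-padding to total width 8)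
def pvFmt08b (i : Int) : List Char :=
  if i < 0 then '-' :: pvPad0 7 (pvNatBin i.natAbs) else pvPad0 8 (pvNatBin i.toNat)

-- string_grid = [''.join(f'{i:08b}' for i in row) for row in grid] (a string as List Char)
def pvStringGrid (grid : List (List Int)) : List (List Char) :=
  grid.map (fun row => (row.map pvFmt08b).flatten)

-- the Python test '0 <= ni < len(grid) and 0 <= nj < len(grid) and grid[ni][nj] == '1''
-- (identical text in both Pythons); a row access Python would raise IndexError on yields none, hence false
def pvHit (g : List (List Char)) (ni nj : Int) : Bool :=
  decide (0 ≤ ni) && decide (ni < (g.length : Int)) && decide (0 ≤ nj) && decide (nj < (g.length : Int)) &&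
    (((PySem.List.pyGet? g ni).bind (fun row => PySem.List.pyGet? row nj)) == some '1')

-- number of grid '1'-cells not yet visited: termination measure for both flood fills
def pvUnvis (g : List (List Char)) (v : List (Int × Int)) : Nat :=
  ((Finset.range g.length ×ˢ Finset.range g.length).filter
    (fun p => pvHit g p.1 p.2 = true ∧ ((p.1 : Int), (p.2 : Int)) ∉ v)).card

theorem pvUnvis_mono (g : List (List Char)) (v w : List (Int × Int)) (h : v ⊆ w) :
    pvUnvis g w ≤ pvUnvis g v := by
  apply Finset.card_le_card
  intro p hp
  simp only [Finset.mem_filter] at hp ⊢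
  exact ⟨hp.1, hp.2.1, fun hm => hp.2.2 (h hm)⟩

theorem pvUnvis_add_lt (g : List (List Char)) (v : List (Int × Int)) (ni nj : Int)
    (hh : pvHit g ni nj = true) (hm : (ni, nj) ∉ v) :
    pvUnvis g (PySem.Set.add v (ni, nj)) < pvUnvis g v := by
  have hb : 0 ≤ ni ∧ ni < (g.length : Int) ∧ 0 ≤ nj ∧ nj < (g.length : Int) := by
    simp only [pvHit, Bool.and_eq_true, decide_eq_true_eq] at hh
    exact ⟨hh.1.1.1.1, hh.1.1.1.2, hh.1.1.2, hh.1.2⟩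
  apply Finset.card_lt_card
  constructor
  · intro p hp
    simp only [Finset.mem_filter] at hp ⊢
    exact ⟨hp.1, hp.2.1, fun hv => hp.2.2 ((PySem.Set.mem_add _ _ _).2 (Or.inl hv))⟩
  · intro hsub
    have hcast1 : ((ni.toNat : Int)) = ni := Int.toNat_of_nonneg hb.1
    have hcast2 : ((nj.toNat : Int)) = nj := Int.toNat_of_nonneg hb.2.2.1
    have hpmem : (ni.toNat, nj.toNat) ∈
        (Finset.range g.length ×ˢ Finset.range g.length).filter
          (fun p => pvHit g p.1 p.2 = true ∧ ((p.1 : Int), (p.2 : Int)) ∉ v) := by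
      simp only [Finset.mem_filter, Finset.mem_product, Finset.mem_range, hcast1, hcast2]
      exact ⟨⟨by omega, by omega⟩, hh, hm⟩
    have := hsub hpmem
    simp only [Finset.mem_filter, hcast1, hcast2] at this
    exact this.2.2 ((PySem.Set.mem_add _ _ _).2 (Or.inr rfl))

-- recursive flood_fill of A; the subtype records v ⊆ result, needed only for termination
mutual
def pvFloodAdj (g : List (List Char)) (ds : List (Int × Int)) (i j : Int)
    (v : List (Int × Int)) : {w : List (Int × Int) // v ⊆ w} :=
  match ds with
  | [] => ⟨v, fun _ h => h⟩
  | (di, dj) :: rest =>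
    let ni := i + di
    let nj := j + dj
    if h : pvHit g ni nj = true ∧ (ni, nj) ∉ v then
      let w1 := pvFloodFill g ni nj (PySem.Set.add v (ni, nj))
      let w2 := pvFloodAdj g rest i j w1.1
      ⟨w2.1, fun x hx => w2.2 (w1.2 ((PySem.Set.mem_add _ _ _).2 (Or.inl hx)))⟩
    else
      pvFloodAdj g rest i j v
termination_by (pvUnvis g v, 1, ds.length)
decreasing_by
  · apply Prod.Lex.left
    exact pvUnvis_add_lt g v (i + di) (j + dj) h.1 h.2
  · have h2 : pvUnvis g (PySem.Set.add v (i + di, j + dj)) < pvUnvis g v :=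
      pvUnvis_add_lt g v (i + di) (j + dj) h.1 h.2
    apply Prod.Lex.left
    exact lt_of_le_of_lt (pvUnvis_mono g _ _ (Subtype.property _)) h2
  · apply Prod.Lex.right
    apply Prod.Lex.right
    simp

def pvFloodFill (g : List (List Char)) (i j : Int)
    (v : List (Int × Int)) : {w : List (Int × Int) // v ⊆ w} :=
  pvFloodAdj g pvADJ i j v
termination_by (pvUnvis g v, 2, 0)
decreasing_by
  apply Prod.Lex.right
  exact Prod.Lex.left _ _ (by omega)
end

def part_2 (grid : List (List Int)) : Int :=
  let g := pvStringGrid grid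
  ((PySem.List.enumerate g).foldl (fun (acc : Int × List (Int × Int)) (p : Int × List Char) =>
    (PySem.List.enumerate p.2).foldl (fun (acc : Int × List (Int × Int)) (q : Int × Char) =>
      if q.2 == '1' && !(PySem.Set.contains acc.2 (p.1, q.1)) then
        (acc.1 + 1, (pvFloodFill g p.1 q.1 acc.2).1)
      else acc) acc) ((0 : Int), PySem.Set.empty)).1

-- ===== PORT B =====
-- total pending directions on the stack (termination bookkeeping for the while loop)
def pvPend (stack : List ((Int × Int) × List (Int × Int))) : Nat :=
  (stack.map (fun f => f.2.length)).sum

-- the while loop of B: pop a (cell, remaining-directions) frame, push back the rest,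
-- and on a hit mark the neighbour and push a fresh frame for it
def pvFloodIter (g : List (List Char)) (stack : List ((Int × Int) × List (Int × Int)))
    (v : List (Int × Int)) : List (Int × Int) :=
  match stack with
  | [] => v
  | ((ci, cj), ds) :: st =>
    match ds with
    | [] => pvFloodIter g st v
    | (di, dj) :: rest =>
      let ni := ci + di
      let nj := cj + dj
      if h : pvHit g ni nj = true ∧ (ni, nj) ∉ v then
        pvFloodIter g (((ni, nj), pvADJ) :: ((ci, cj), rest) :: st) (PySem.Set.add v (ni, nj))
      else
        pvFloodIter g (((ci, cj), rest) :: st) v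
termination_by 6 * pvUnvis g v + pvPend stack + stack.length
decreasing_by
  · simp only [pvPend, List.map_cons, List.sum_cons, List.length_cons]
    omega
  · have h2 : pvUnvis g (PySem.Set.add v (ci + di, cj + dj)) < pvUnvis g v :=
      pvUnvis_add_lt g v (ci + di) (cj + dj) h.1 h.2
    simp only [pvPend, List.map_cons, List.sum_cons, List.length_cons, pvADJ]
    simp only [List.length_nil]
    omega
  · simp only [pvPend, List.map_cons, List.sum_cons, List.length_cons]
    omega

def part_2_alt (grid : List (List Int)) : Int :=
  let g := pvStringGrid grid
  ((PySem.List.enumerate g).foldl (fun (acc : Int × List (Int × Int)) (p : Int × List Char) =>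
    (PySem.List.enumerate p.2).foldl (fun (acc : Int × List (Int × Int)) (q : Int × Char) =>
      if q.2 == '1' && !(PySem.Set.contains acc.2 (p.1, q.1)) then
        (acc.1 + 1, pvFloodIter g [((p.1, q.1), pvADJ)] acc.2)
      else acc) acc) ((0 : Int), PySem.Set.empty)).1

-- ===== PRECONDITION & SPEC =====
-- true unless row ni exists and is shorter than nj+1 (the access Python's grid[ni][nj] would raise on)
def pvRowLenOk (g : List (List Char)) (ni nj : Int) : Bool :=
  match PySem.List.pyGet? g ni with
  | some r => decide (nj < (r.length : Int))
  | none => true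

-- Pre_ excludes exactly the grids on which A raises IndexError: those whose bit-string grid has a '1'
-- with a four-neighbour that passes the bounds test (both axes bounded by len(grid), as in the source) yet lies past the end of a shorter row.
def Pre_part_2 (grid : List (List Int)) : Prop :=
  ∀ p ∈ PySem.List.enumerate (pvStringGrid grid), ∀ q ∈ PySem.List.enumerate p.2,
    q.2 = '1' → ∀ d ∈ pvADJ,
      (0 ≤ p.1 + d.1 ∧ p.1 + d.1 < ((pvStringGrid grid).length : Int) ∧
       0 ≤ q.1 + d.2 ∧ q.1 + d.2 < ((pvStringGrid grid).length : Int)) →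
      pvRowLenOk (pvStringGrid grid) (p.1 + d.1) (q.1 + d.2) = true
instance (grid : List (List Int)) : Decidable (Pre_part_2 grid) := by unfold Pre_part_2; infer_instance
def pvWitness_part_2 : List (List Int) := [[1, 0], [255, 3]]
def Spec_part_2 (grid : List (List Int)) (out : Int) : Prop := out = part_2_alt grid
instance (grid : List (List Int)) (out : Int) : Decidable (Spec_part_2 grid out) := by unfold Spec_part_2; infer_instance

-- ===== CLAIM (what is proved, stated in full; the proofs are below) =====
def Claim_equal_part_2 : Prop := ∀ (grid : List (List Int)), Dom_part_2 grid → Pre_part_2 grid → Spec_part_2 grid (part_2 grid)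

-- ===== LEMMAS AND PROOFS =====

-- unfolding lemma for the mutual recursion: flood_fill is the ADJACENCY loop
theorem pvFill_eq (g : List (List Char)) (i j : Int) (v : List (Int × Int)) :
    (pvFloodFill g i j v).1 = (pvFloodAdj g pvADJ i j v).1 := by
  unfold pvFloodFill
  rfl

-- the iterative flood fill executes the frames of its stack like nested recursive calls:
-- a frame (c, ds) on top behaves exactly as pvFloodAdj ds c would
theorem pvIter_eq_adj : ∀ (M : Nat) (g : List (List Char)) (ci cj : Int)
    (ds : List (Int × Int)) (st : List ((Int × Int) × List (Int × Int))) (v : List (Int × Int)),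
    6 * pvUnvis g v + pvPend (((ci, cj), ds) :: st) + (st.length + 1) ≤ M →
    pvFloodIter g (((ci, cj), ds) :: st) v = pvFloodIter g st (pvFloodAdj g ds ci cj v).1 := by
  intro M
  induction M with
  | zero => intro g ci cj ds st v hM; omega
  | succ M ih =>
    intro g ci cj ds st v hM
    match ds with
    | [] =>
      rw [pvFloodIter, pvFloodAdj]
    | (di, dj) :: rest =>
      rw [pvFloodIter]
      by_cases h : pvHit g (ci + di) (cj + dj) = true ∧ (ci + di, cj + dj) ∉ v
      · rw [dif_pos h]
        have hlt : pvUnvis g (PySem.Set.add v (ci + di, cj + dj)) < pvUnvis g v :=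
          pvUnvis_add_lt g v _ _ h.1 h.2
        rw [ih g (ci + di) (cj + dj) pvADJ (((ci, cj), rest) :: st) _ (by
          simp only [pvPend, List.map_cons, List.sum_cons, List.length_cons, pvADJ] at hM ⊢
          simp only [List.length_nil] at hM ⊢
          omega)]
        have hsub : pvUnvis g (pvFloodAdj g pvADJ (ci + di) (cj + dj)
            (PySem.Set.add v (ci + di, cj + dj))).1 ≤ pvUnvis g (PySem.Set.add v (ci + di, cj + dj)) :=
          pvUnvis_mono g _ _ (pvFloodAdj g pvADJ (ci + di) (cj + dj) _).2
        rw [ih g ci cj rest st _ (by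
          simp only [pvPend, List.map_cons, List.sum_cons, List.length_cons] at hM ⊢
          omega)]
        rw [pvFloodAdj]
        simp only [dif_pos h]
        rw [pvFill_eq]
      · rw [dif_neg h]
        rw [ih g ci cj rest st v (by
          simp only [pvPend, List.map_cons, List.sum_cons, List.length_cons] at hM ⊢
          omega)]
        rw [pvFloodAdj]
        simp only [dif_neg h]

-- the iterative flood fill started on a single fresh frame equals the recursive flood_fill
theorem pvIter_eq_fill (g : List (List Char)) (i j : Int) (v : List (Int × Int)) :
    pvFloodIter g [((i, j), pvADJ)] v = (pvFloodFill g i j v).1 := by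
  rw [pvIter_eq_adj (6 * pvUnvis g v + pvPend [((i, j), pvADJ)] + 1) g i j pvADJ [] v (by
    simp only [List.length_nil]; omega)]
  rw [pvFloodIter, pvFill_eq]

-- ===== VERDICT (by name: the statement is the Claim_ definition above) =====
theorem part_2_spec : Claim_equal_part_2 := by
  intro grid _ _
  unfold Spec_part_2 part_2 part_2_alt
  simp only [pvIter_eq_fill]
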